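-- pv_equiv track=rewrite | github.com/MrBrantCode/unitest_baseline | mut_generate/mist_train_cf/cf_44742/solution.py | unique_subarrays
-- ===== SOURCE A (Python) =====
-- def unique_subarrays(lst, k):
--     lst.sort()
--     i, j, ans = 0, 0, 0
--     seen = set()
--     while i < len(lst):
--         if lst[i] in seen:
--             i += 1
--             continue
--         while j < len(lst) and lst[j] - lst[i] <= k:
--             j += 1
--         ans += j - i - 1
--         seen.add(lst[i])
--         i += 1
--     return ans
-- ===== SOURCE B (Python) =====
-- def _upper(s, x):
--     # first index in sorted s whose element exceeds x (binary search)
--     lo, hi = 0, len(s)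
--     while lo < hi:
--         mid = (lo + hi) // 2
--         if s[mid] <= x:
--             lo = mid + 1
--         else:
--             hi = mid
--     return lo
--
-- def unique_subarrays(lst, k):
--     lst.sort()
--     # pass 1: one (value, first index) pair per distinct value, by adjacent comparison
--     starts = []
--     for idx in range(len(lst)):
--         if idx == 0 or lst[idx] != lst[idx - 1]:
--             starts.append((lst[idx], idx))
--     # pass 2: each distinct start contributes (count of elements <= v + k) - first - 1
--     ans = 0
--     for v, f in starts:
--         ans += _upper(lst, v + k) - f - 1
--     return ans
-- ===== Notes on version B (the rewrite author's own statement) =====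
-- stated objective: alternative
-- what changed: A's single sliding-window scan with a persistent pointer j and a seen-set is replaced by two staged passes: an adjacent-comparison pass collecting one (value, first index) pair per distinct value, then an independent binary search per pair; no set and no shared pointer state.
import Mathlib
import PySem

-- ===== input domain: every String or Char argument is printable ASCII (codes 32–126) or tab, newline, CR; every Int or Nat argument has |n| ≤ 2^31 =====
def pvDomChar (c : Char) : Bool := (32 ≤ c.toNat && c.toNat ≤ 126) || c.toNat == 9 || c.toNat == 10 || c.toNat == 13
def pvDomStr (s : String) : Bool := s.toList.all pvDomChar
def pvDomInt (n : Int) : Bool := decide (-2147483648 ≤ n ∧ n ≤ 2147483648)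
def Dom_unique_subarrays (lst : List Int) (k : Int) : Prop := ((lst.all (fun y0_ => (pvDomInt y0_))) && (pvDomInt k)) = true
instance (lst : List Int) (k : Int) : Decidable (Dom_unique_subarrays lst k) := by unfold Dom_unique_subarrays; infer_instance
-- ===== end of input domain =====

-- B replaces A's single sliding-window scan (persistent pointer j + seen set) by two staged
-- passes: an adjacent-comparison pass collecting one (value, first index) pair per distinct
-- value, then an independent binary search per pair; same return value on every input.
-- Both A and B sort lst in place in Python; the equivalence proved is about the return value.
-- (Loops are ported with an explicit fuel argument bounding the remaining iterations.)

-- ===== PORT A =====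
-- inner while: 'while j < len(lst) and lst[j] - lst[i] <= k: j += 1'
def pvAdvA (s : List Int) (k x : Int) : Nat → Nat → Nat
  | 0, j => j
  | fuel + 1, j =>
    if h : j < s.length then
      if s[j] - x ≤ k then pvAdvA s k x fuel (j + 1) else j
    else j

-- outer while over i, with the persistent pointer j and the seen set
def pvLoopA (s : List Int) (k : Int) : Nat → Nat → Nat → Int → PySem.Set Int → Int
  | 0, _, _, ans, _ => ans
  | fuel + 1, i, j, ans, seen =>
    if h : i < s.length then
      if PySem.Set.contains seen s[i] then pvLoopA s k fuel (i + 1) j ans seen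
      else
        let j' := pvAdvA s k s[i] s.length j
        pvLoopA s k fuel (i + 1) j' (ans + (j' : Int) - (i : Int) - 1) (PySem.Set.add seen s[i])
    else ans

def unique_subarrays (lst : List Int) (k : Int) : Int :=
  let s := PySem.List.sorted lst (fun x => x) false
  pvLoopA s k s.length 0 0 0 PySem.Set.empty

-- ===== PORT B =====
-- Source B's _upper: binary search for the first index whose element exceeds x
def pvUpperB (s : List Int) (x : Int) : Nat → Nat → Nat → Nat
  | 0, lo, _ => lo
  | fuel + 1, lo, hi =>
    if lo < hi then
      if s.getD ((lo + hi) / 2) 0 ≤ x then pvUpperB s x fuel ((lo + hi) / 2 + 1) hi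
      else pvUpperB s x fuel lo ((lo + hi) / 2)
    else lo

-- pass 1: 'for idx in range(len(lst)): if idx == 0 or lst[idx] != lst[idx-1]: starts.append(...)'
def pvStartsB (s : List Int) : Nat → Nat → List (Int × Nat) → List (Int × Nat)
  | 0, _, acc => acc
  | fuel + 1, idx, acc =>
    if h : idx < s.length then
      if idx = 0 ∨ s.getD (idx - 1) 0 ≠ s[idx] then
        pvStartsB s fuel (idx + 1) (acc ++ [(s[idx], idx)])
      else pvStartsB s fuel (idx + 1) acc
    else acc

-- pass 2: 'for v, f in starts: ans += _upper(lst, v + k) - f - 1'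
def unique_subarrays_alt (lst : List Int) (k : Int) : Int :=
  let s := PySem.List.sorted lst (fun x => x) false
  let starts := pvStartsB s s.length 0 []
  starts.foldl (fun ans vf => ans + (pvUpperB s (vf.1 + k) s.length 0 s.length : Int) - (vf.2 : Int) - 1) 0

-- ===== PRECONDITION & SPEC =====
def Spec_unique_subarrays (lst : List Int) (k : Int) (out : Int) : Prop := out = unique_subarrays_alt lst k
instance (lst : List Int) (k : Int) (out : Int) : Decidable (Spec_unique_subarrays lst k out) := by unfold Spec_unique_subarrays; infer_instance

-- ===== CLAIM (what is proved, stated in full; the proofs are below) =====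
def Claim_equal_unique_subarrays : Prop := ∀ (lst : List Int) (k : Int), Dom_unique_subarrays lst k → Spec_unique_subarrays lst k (unique_subarrays lst k)

-- ===== LEMMAS AND PROOFS =====

-- the common yardstick both loops are reduced to: sum over first-occurrence indices i of
-- (upper bound of s[i]+k) - i - 1, scanning indices from position i with the given fuel
def pvSum (s : List Int) (k : Int) : Nat → Nat → Int
  | 0, _ => 0
  | fuel + 1, i =>
    if h : i < s.length then
      (if i = 0 ∨ s.getD (i - 1) 0 ≠ s[i] then
        (pvUpperB s (s[i] + k) s.length 0 s.length : Int) - (i : Int) - 1 else 0)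
      + pvSum s k fuel (i + 1)
    else 0

-- boundary characterisation: c is the upper-bound index of x in s
def pvBnd (s : List Int) (x : Int) (c : Nat) : Prop :=
  c ≤ s.length ∧ (∀ m (_ : m < s.length), m < c → s[m] ≤ x) ∧
    (∀ m (_ : m < s.length), c ≤ m → x < s[m])

lemma pvMono {s : List Int} (hs : s.Pairwise (· ≤ ·)) {p q : Nat}
    (hpq : p ≤ q) (hq : q < s.length) : s[p]'(lt_of_le_of_lt hpq hq) ≤ s[q] := by
  rcases Nat.eq_or_lt_of_le hpq with h | h
  · subst h; rfl
  · exact (List.pairwise_iff_getElem.mp hs) p q _ hq h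

-- pvUpperB computes the boundary (fuel bounds hi - lo)
lemma pvUpperB_bnd {s : List Int} (hs : s.Pairwise (· ≤ ·)) (x : Int) :
    ∀ (fuel lo hi : Nat), lo ≤ hi → hi ≤ s.length → hi - lo ≤ fuel →
    (∀ m (_ : m < s.length), m < lo → s[m] ≤ x) →
    (∀ m (_ : m < s.length), hi ≤ m → x < s[m]) →
    pvBnd s x (pvUpperB s x fuel lo hi) := by
  intro fuel
  induction fuel with
  | zero =>
    intro lo hi hlohi hhile hfuel Hlo Hhi
    simp only [pvUpperB]
    exact ⟨by omega, fun m hm hmlt => Hlo m hm (by omega),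
           fun m hm hmle => Hhi m hm (by omega)⟩
  | succ fuel ih =>
    intro lo hi hlohi hhile hfuel Hlo Hhi
    rw [pvUpperB]
    split
    · next h =>
      have hmid : (lo + hi) / 2 < s.length := by omega
      have hget : s.getD ((lo + hi) / 2) 0 = s[(lo + hi) / 2] := List.getD_eq_getElem s 0 hmid
      split
      · next hle =>
        exact ih ((lo + hi) / 2 + 1) hi (by omega) hhile (by omega)
          (fun m hm hmlt => le_trans (pvMono hs (by omega) hmid) (hget ▸ hle)) Hhi
      · next hgt =>
        exact ih lo ((lo + hi) / 2) (by omega) (by omega) (by omega) Hlo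
          (fun m hm hmle => lt_of_lt_of_le (by rw [hget] at hgt; omega) (pvMono hs hmle hm))
    · next h =>
      exact ⟨by omega, fun m hm hmlt => Hlo m hm (by omega),
             fun m hm hmle => Hhi m hm (by omega)⟩

-- A's inner while reaches the boundary whenever it starts at or below it
lemma pvAdvA_eq {s : List Int} {k x : Int} {c : Nat} (hb : pvBnd s (x + k) c) :
    ∀ (fuel j : Nat), j ≤ c → c ≤ j + fuel → pvAdvA s k x fuel j = c := by
  intro fuel
  induction fuel with
  | zero => intro j h1 h2; simp [pvAdvA]; omega
  | succ fuel ih =>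
    intro j hjc hfuel
    rw [pvAdvA]
    split
    · next h =>
      split
      · next hcond =>
        have hjlt : j < c := by
          by_contra hge
          have := hb.2.2 j h (by omega)
          omega
        exact ih (j + 1) (by omega) (by omega)
      · next hcond =>
        have hnlt : ¬ j < c := fun hlt => by have := hb.2.1 j h hlt; omega
        omega
    · next h =>
      have := hb.1
      omega

-- A's loop with its persistent pointer j and seen set computes pvSum: the j-invariant says
-- every index below j holds a value ≤ s[i]+k, the seen-invariant says seen = {s[m] | m < i}
lemma pvLoopA_eq_pvSum {s : List Int} (hs : s.Pairwise (· ≤ ·)) (k : Int) :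
    ∀ (fuel i j : Nat) (ans : Int) (seen : PySem.Set Int), j ≤ s.length →
    (∀ m (_ : m < s.length), m < j → ∀ (hi : i < s.length), s[m] ≤ s[i] + k) →
    (∀ v, v ∈ seen ↔ ∃ m, ∃ (_ : m < s.length), m < i ∧ s[m] = v) →
    pvLoopA s k fuel i j ans seen = ans + pvSum s k fuel i := by
  intro fuel
  induction fuel with
  | zero => intro i j ans seen _ _ _; simp [pvLoopA, pvSum]
  | succ fuel ih =>
    intro i j ans seen hj Hj Hseen
    rw [pvLoopA, pvSum]
    split
    · next h =>
      split
      · next hseen =>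
        -- s[i] already seen: some m < i has s[m] = s[i], so s[i-1] = s[i] and the guard is false
        have hmem : s[i] ∈ seen := by simpa [pysem] using hseen
        obtain ⟨m, hm, hmi, hval⟩ := (Hseen s[i]).mp hmem
        have hguard : ¬ (i = 0 ∨ s.getD (i - 1) 0 ≠ s[i]) := by
          have hi1 : i - 1 < s.length := by omega
          have h1 : s[m] ≤ s[i - 1] := pvMono hs (by omega) hi1
          have h2 : s[i - 1] ≤ s[i] := pvMono hs (by omega) h
          rw [List.getD_eq_getElem s 0 hi1]
          push Not
          exact ⟨by omega, by omega⟩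
        rw [if_neg hguard]
        have := ih (i + 1) j ans seen hj
          (fun m' hm' hmj hi1 => by
            have h1 := Hj m' hm' hmj h
            have h2 : s[i]'(by omega) ≤ s[i+1]'hi1 := pvMono hs (Nat.le_succ i) hi1
            omega)
          (fun v => by
            rw [Hseen v]
            constructor
            · rintro ⟨m', hm', hmi', hv⟩; exact ⟨m', hm', by omega, hv⟩
            · rintro ⟨m', hm', hmi', hv⟩
              by_cases hmi2 : m' < i
              · exact ⟨m', hm', hmi2, hv⟩
              · have : m' = i := by omega
                subst this
                exact ⟨m, hm, hmi, by omega⟩)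
        omega
      · next hseen =>
        -- first occurrence: guard holds, inner while reaches the upper bound
        have hnmem : s[i] ∉ seen := fun hx => hseen (by simpa [pysem] using hx)
        have hguard : i = 0 ∨ s.getD (i - 1) 0 ≠ s[i] := by
          by_contra hng
          push Not at hng
          obtain ⟨hne, heq⟩ := hng
          have hi1 : i - 1 < s.length := by omega
          rw [List.getD_eq_getElem s 0 hi1] at heq
          exact hnmem ((Hseen s[i]).mpr ⟨i - 1, hi1, by omega, heq⟩)
        rw [if_pos hguard]
        have hbnd : pvBnd s (s[i] + k) (pvUpperB s (s[i] + k) s.length 0 s.length) :=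
          pvUpperB_bnd hs _ s.length 0 s.length (Nat.zero_le _) le_rfl (by omega)
            (fun m hm hmlt => absurd hmlt (by omega)) (fun m hm hmle => absurd hm (by omega))
        have hjle : j ≤ pvUpperB s (s[i] + k) s.length 0 s.length := by
          by_contra hgt
          have hmlen : pvUpperB s (s[i] + k) s.length 0 s.length < s.length := by omega
          have h1 := Hj _ hmlen (by omega) h
          have h2 := hbnd.2.2 _ hmlen le_rfl
          omega
        rw [pvAdvA_eq hbnd s.length j hjle (by have := hbnd.1; omega)]
        have := ih (i + 1) (pvUpperB s (s[i] + k) s.length 0 s.length)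
          (ans + (pvUpperB s (s[i] + k) s.length 0 s.length : Int) - (i : Int) - 1)
          (PySem.Set.add seen s[i]) hbnd.1
          (fun m hm hmj hi1 => by
            have h1 := hbnd.2.1 m hm hmj
            have h2 : s[i]'(by omega) ≤ s[i+1]'hi1 := pvMono hs (Nat.le_succ i) hi1
            omega)
          (fun v => by
            rw [PySem.Set.mem_add, Hseen v]
            constructor
            · rintro (⟨m', hm', hmi', hv⟩ | hv)
              · exact ⟨m', hm', by omega, hv⟩
              · exact ⟨i, h, by omega, hv.symm⟩
            · rintro ⟨m', hm', hmi', hv⟩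
              by_cases hmi2 : m' < i
              · exact Or.inl ⟨m', hm', hmi2, hv⟩
              · have : m' = i := by omega
                subst this
                exact Or.inr hv.symm)
        exact this.trans (by omega)
    · next h => simp
-- B's two passes compute pvSum: folding the step over the collected pairs sums the same terms
lemma pvStartsB_fold_eq_pvSum (s : List Int) (k : Int) :
    ∀ (fuel idx : Nat) (acc : List (Int × Nat)) (a : Int),
    (pvStartsB s fuel idx acc).foldl
      (fun ans vf => ans + (pvUpperB s (vf.1 + k) s.length 0 s.length : Int) - (vf.2 : Int) - 1) a
    = acc.foldl
      (fun ans vf => ans + (pvUpperB s (vf.1 + k) s.length 0 s.length : Int) - (vf.2 : Int) - 1) a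
      + pvSum s k fuel idx := by
  intro fuel
  induction fuel with
  | zero => intro idx acc a; simp [pvStartsB, pvSum]
  | succ fuel ih =>
    intro idx acc a
    rw [pvStartsB, pvSum]
    split
    · next h =>
      split
      · next hguard =>
        rw [ih (idx + 1) (acc ++ [(s[idx], idx)]) a, List.foldl_append]
        simp only [List.foldl]
        omega
      · next hguard =>
        rw [ih (idx + 1) acc a]
        omega
    · next h => simp

-- ===== VERDICT (by name: the statement is the Claim_ definition above) =====
theorem unique_subarrays_spec : Claim_equal_unique_subarrays := by
  intro lst k _
  unfold Spec_unique_subarrays unique_subarrays unique_subarrays_alt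
  have hs := PySem.List.sorted_pairwise lst (fun x => x)
  rw [pvLoopA_eq_pvSum hs k _ 0 0 0 PySem.Set.empty (Nat.zero_le _)
        (fun m hm hmj _ => absurd hmj (by omega))
        (fun v => by simp [PySem.Set.empty]),
      pvStartsB_fold_eq_pvSum _ k _ 0 [] 0]
  simp
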